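-- pv_equiv track=rewrite | github.com/saanvi-stack/Movieticketbooking | app.py | generate_seating_numbers
-- ===== SOURCE A (Python) =====
-- import string
--
-- def generate_seating_numbers(num_tickets, existing_seats):
--     MAX_SEATS_PER_ROW = 9
--     letters = string.ascii_uppercase
--     seating_numbers = []
--
--     # Start seating from letter 'C'
--     current_letter_index = letters.index('C')
--
--     # Generate seating numbers with a combination of letter and number
--     for i in range(num_tickets):
--         # Iterate through letters to find available seats
--         for letter in letters[current_letter_index:]:
--             available_seats = [seat for seat in range(1, MAX_SEATS_PER_ROW + 1) if f"{letter}{seat}" not in existing_seats]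
--             if available_seats:
--                 seat_number = available_seats[0]
--                 seating_numbers.append(f"{letter}{seat_number}")
--                 existing_seats.append(f"{letter}{seat_number}")
--                 break  # Break the loop once a seat is found for the current letter
--         else:
--             raise ValueError("Not enough available seats")
--
--         # If seats for the current letter are exhausted, move to the next letter
--         if len(available_seats) == 0:
--             current_letter_index += 1
--
--             # Check if all letters are exhausted
--             if current_letter_index >= len(letters):
--                 raise ValueError("Not enough available seats")
--
--     return seating_numbers
-- ===== SOURCE B (Python) =====
-- import string
--
--
-- def generate_seating_numbers(num_tickets, existing_seats):
--     # Single pass over the fixed candidate order C1..C9, D1..D9, ..., Z1..Z9.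
--     candidates = [f"{letter}{n}" for letter in string.ascii_uppercase[2:] for n in range(1, 10)]
--     result = []
--     for label in candidates:
--         if len(result) >= num_tickets:
--             break
--         if label not in existing_seats:
--             result.append(label)
--             existing_seats.append(label)
--     if len(result) < num_tickets:
--         raise ValueError("Not enough available seats")
--     return result
-- ===== Notes on version B (the rewrite author's own statement) =====
-- stated objective: faster
-- what changed: A rescans the rows from 'C' and rebuilds a 9-seat availability list for every ticket; B builds the fixed candidate order C1..C9,...,Z1..Z9 once and makes a single pass over it, taking the first still-free labels, so each candidate label is membership-tested at most once overall.
import Mathlib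
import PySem

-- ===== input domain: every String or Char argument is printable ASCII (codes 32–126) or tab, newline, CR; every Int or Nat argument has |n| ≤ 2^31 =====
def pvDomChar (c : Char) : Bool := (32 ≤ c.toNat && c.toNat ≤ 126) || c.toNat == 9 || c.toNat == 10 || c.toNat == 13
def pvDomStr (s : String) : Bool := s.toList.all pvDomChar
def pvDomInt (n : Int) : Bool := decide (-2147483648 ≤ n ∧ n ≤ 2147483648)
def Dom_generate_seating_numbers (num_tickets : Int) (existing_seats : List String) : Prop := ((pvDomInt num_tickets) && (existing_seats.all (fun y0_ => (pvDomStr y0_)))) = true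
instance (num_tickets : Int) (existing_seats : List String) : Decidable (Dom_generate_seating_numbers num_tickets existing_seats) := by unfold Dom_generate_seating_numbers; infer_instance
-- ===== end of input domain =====

-- B replaces A's per-ticket rescan of all rows with one pass over the fixed candidate
-- order C1..Z9 (return-value equivalence; both A and B append the chosen labels to
-- existing_seats in the same order, so the observable mutation also agrees).

-- ===== PORT A =====
-- f"{letter}{seat}"
def pvSeat (letter : Char) (seat : Int) : String :=
  String.ofList (letter :: (PySem.Int.toStr seat).toList)

-- letters = string.ascii_uppercase
def pvLetters : List Char := "ABCDEFGHIJKLMNOPQRSTUVWXYZ".toList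

-- available_seats = [seat for seat in range(1, MAX_SEATS_PER_ROW + 1) if f"{letter}{seat}" not in existing_seats]
def pvAvail (letter : Char) (existing : List String) : List Int :=
  (PySem.List.pyRange 1 (9 + 1) 1).filter (fun seat => !(existing.contains (pvSeat letter seat)))

-- the inner 'for letter in letters[current_letter_index:]: … break / else: raise'
-- (none = the for-else raise path)
def pvInner : List Char → List String → Option (String × List Int)
  | [], _ => none
  | l :: rest, existing =>
    match pvAvail l existing with
    | [] => pvInner rest existing
    | s :: ss => some (pvSeat l s, s :: ss)   -- seat_number = available_seats[0]; break

-- one iteration of 'for i in range(num_tickets)'; state = (seating_numbers, existing_seats,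
-- current_letter_index, raised); once raised the state is frozen (the Python has raised)
def pvAStep (st : List String × List String × Int × Bool) (_i : Int) :
    List String × List String × Int × Bool :=
  let (seating, existing, cli, raised) := st
  if raised then st
  else
    match pvInner (PySem.List.slice pvLetters (some cli) none) existing with
    | none => (seating, existing, cli, true)
    | some (lbl, available) =>
      let seating := seating ++ [lbl]
      let existing := existing ++ [lbl]
      if available.length == 0 then
        let cli := cli + 1
        if cli ≥ (pvLetters.length : Int) then (seating, existing, cli, true)
        else (seating, existing, cli, false)
      else (seating, existing, cli, false)

def generate_seating_numbers (num_tickets : Int) (existing_seats : List String) : List String :=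
  let cli := PySem.Str.find "ABCDEFGHIJKLMNOPQRSTUVWXYZ" "C"   -- letters.index('C')
  ((PySem.List.pyRange 0 num_tickets 1).foldl pvAStep ([], existing_seats, cli, false)).1

-- ===== PORT B =====
-- candidates = [f"{letter}{n}" for letter in string.ascii_uppercase[2:] for n in range(1, 10)]
def pvCandidates : List String :=
  (PySem.List.slice "ABCDEFGHIJKLMNOPQRSTUVWXYZ".toList (some 2) none).flatMap
    (fun letter => (PySem.List.pyRange 1 10 1).map (fun n => pvSeat letter n))

-- the single 'for label in candidates' pass (the final raise lies outside Pre_)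
def pvPick : List String → List String → Int → List String → List String
  | [], _, _, result => result
  | label :: rest, existing, need, result =>
    if (result.length : Int) ≥ need then result
    else if existing.contains label then pvPick rest existing need result
    else pvPick rest (existing ++ [label]) need (result ++ [label])

def generate_seating_numbers_alt (num_tickets : Int) (existing_seats : List String) : List String :=
  pvPick pvCandidates existing_seats num_tickets []

-- ===== PRECONDITION & SPEC =====
-- Pre_ excludes exactly the inputs on which A raises ValueError ("Not enough available
-- seats"): more tickets requested than labels of C1..Z9 absent from existing_seats.
-- (The first disjunct is logically redundant — the count is nonnegative — it only keeps
-- the precondition kernel-decidable at the witness without evaluating the 216-label filter.)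
def Pre_generate_seating_numbers (num_tickets : Int) (existing_seats : List String) : Prop :=
  num_tickets ≤ 0 ∨
    num_tickets ≤ ((pvCandidates.filter (fun c => !(existing_seats.contains c))).length : Int)
instance (num_tickets : Int) (existing_seats : List String) : Decidable (Pre_generate_seating_numbers num_tickets existing_seats) := by unfold Pre_generate_seating_numbers; infer_instance

def pvWitness_generate_seating_numbers : Int × List String := (0, ["C1", "D3"])

def Spec_generate_seating_numbers (num_tickets : Int) (existing_seats : List String) (out : List String) : Prop := out = generate_seating_numbers_alt num_tickets existing_seats
instance (num_tickets : Int) (existing_seats : List String) (out : List String) : Decidable (Spec_generate_seating_numbers num_tickets existing_seats out) := by unfold Spec_generate_seating_numbers; infer_instance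

-- ===== CLAIM (what is proved, stated in full; the proofs are below) =====
def Claim_equal_generate_seating_numbers : Prop := ∀ (num_tickets : Int) (existing_seats : List String), Dom_generate_seating_numbers num_tickets existing_seats → Pre_generate_seating_numbers num_tickets existing_seats → Spec_generate_seating_numbers num_tickets existing_seats (generate_seating_numbers num_tickets existing_seats)

-- ===== LEMMAS AND PROOFS =====

-- the free labels still available relative to a given existing_seats list
def pvFree (existing : List String) : List String :=
  pvCandidates.filter (fun c => !(existing.contains c))

set_option maxRecDepth 8192 in
theorem pvCandidates_nodup' : (pvCandidates.map String.toList).Nodup := by decide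

theorem pvCandidates_nodup : pvCandidates.Nodup := pvCandidates_nodup'.of_map

-- B's pass collects the first (need - result.length) free labels, in order
theorem pvPick_eq (cs : List String) :
    ∀ (existing result : List String) (need : Int), cs.Nodup →
    pvPick cs existing need result =
      result ++ (cs.filter (fun c => !(existing.contains c))).take ((need - result.length).toNat) := by
  induction cs with
  | nil => intro existing result need _; simp [pvPick]
  | cons c cs ih =>
    intro existing result need hnd
    rw [List.nodup_cons] at hnd
    by_cases hge : (result.length : Int) ≥ need
    · have : (need - (result.length : Int)).toNat = 0 := by omega
      simp [pvPick, hge, this]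
    · by_cases hc : existing.contains c
      · have hc' : c ∈ existing := by simpa using hc
        simp only [pvPick, if_neg hge, if_pos hc]
        rw [ih existing result need hnd.2]
        simp [hc']
      · simp only [pvPick, if_neg hge, if_neg hc]
        rw [ih (existing ++ [c]) (result ++ [c]) need hnd.2]
        have hfilt : cs.filter (fun x => !((existing ++ [c]).contains x)) =
            cs.filter (fun x => !(existing.contains x)) := by
          apply List.filter_congr
          intro x hx
          have hxc : x ≠ c := fun h => hnd.1 (h ▸ hx)
          simp [hxc]
        rw [hfilt]
        have harith : (need - ((result ++ [c]).length : Int)).toNat =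
            (need - (result.length : Int)).toNat - 1 := by
          simp only [List.length_append, List.length_cons, List.length_nil]
          omega
        obtain ⟨m, hm⟩ : ∃ m, (need - (result.length : Int)).toNat = m + 1 :=
          ⟨(need - (result.length : Int)).toNat - 1, by omega⟩
        rw [harith, hm, List.filter_cons_of_pos (by simpa using hc), List.take_succ_cons]
        simp
  
-- the map-through-fst view of the inner scan: it returns the first free label of the
-- candidate block spanned by the remaining letters
theorem pvAvail_eq (l : Char) (ex : List String) :
    pvAvail l ex = (PySem.List.pyRange 1 10 1).filter (fun seat => !(ex.contains (pvSeat l seat))) := by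
  norm_num [pvAvail]

theorem pvInner_spec (ls : List Char) (ex : List String) :
    (pvInner ls ex).map Prod.fst =
      (ls.flatMap (fun l => (PySem.List.pyRange 1 10 1).map (fun n => pvSeat l n))).find?
        (fun c => !(ex.contains c)) := by
  induction ls with
  | nil => simp [pvInner]
  | cons l rest ih =>
    have hrow : ((PySem.List.pyRange 1 10 1).map (fun n => pvSeat l n)).find?
        (fun c => !(ex.contains c)) = (pvAvail l ex).head?.map (fun n => pvSeat l n) := by
      rw [List.find?_map, pvAvail_eq, ← List.head?_filter]
      rfl
    rw [List.flatMap_cons, List.find?_append, hrow]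
    cases hav : pvAvail l ex with
    | nil => simpa [pvInner, hav] using ih
    | cons s ss => simp [pvInner, hav]

theorem pvInner_snd (ls : List Char) (ex : List String) (lbl : String) (avail : List Int)
    (h : pvInner ls ex = some (lbl, avail)) : avail ≠ [] := by
  induction ls with
  | nil => simp [pvInner] at h
  | cons l rest ih =>
    rw [pvInner] at h
    cases hav : pvAvail l ex with
    | nil => rw [hav] at h; exact ih h
    | cons s ss => rw [hav] at h; simp at h; rw [← h.2]; simp

-- the loop variable i of A's outer loop is never used
theorem foldl_pvAStep (l : List Int) (s : List String × List String × Int × Bool) :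
    l.foldl pvAStep s = (fun st => pvAStep st 0)^[l.length] s := by
  induction l generalizing s with
  | nil => rfl
  | cons a l ih =>
    rw [List.foldl_cons, ih, List.length_cons, Function.iterate_succ_apply]
    rfl

-- one successful outer iteration: pick the first free label, append it to both lists
theorem pvAStep_step (ex acc : List String) (c : String)
    (hc : (pvFree ex).head? = some c) :
    pvAStep (acc, ex, 2, false) 0 = (acc ++ [c], ex ++ [c], 2, false) := by
  have hfind : pvCandidates.find? (fun x => !(ex.contains x)) = some c := by
    rw [← List.head?_filter]; exact hc
  have hspec := pvInner_spec (PySem.List.slice pvLetters (some 2) none) ex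
  rw [show ((PySem.List.slice pvLetters (some 2) none).flatMap
      (fun l => (PySem.List.pyRange 1 10 1).map (fun n => pvSeat l n))) = pvCandidates from rfl,
    hfind] at hspec
  cases hinn : pvInner (PySem.List.slice pvLetters (some 2) none) ex with
  | none => rw [hinn] at hspec; simp at hspec
  | some pr =>
    obtain ⟨lbl, avail⟩ := pr
    rw [hinn] at hspec
    simp at hspec
    have hne := pvInner_snd _ _ _ _ hinn
    cases avail with
    | nil => exact absurd rfl hne
    | cons a t => simp [pvAStep, hinn, hspec]

-- appending the first free label removes exactly it from the free list
theorem pvFree_append (ex : List String) (c : String)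
    (hc : (pvFree ex).head? = some c) :
    pvFree (ex ++ [c]) = (pvFree ex).tail := by
  have hnd : (pvFree ex).Nodup := pvCandidates_nodup.filter _
  have hpred : ∀ x : String, (!((ex ++ [c]).contains x)) =
      ((!(x == c)) && (!(ex.contains x))) := by
    intro x
    by_cases hx : x = c <;> simp [hx]
  unfold pvFree at *
  calc pvCandidates.filter (fun x => !((ex ++ [c]).contains x))
      = pvCandidates.filter (fun x => (!(x == c)) && (!(ex.contains x))) := by
        exact List.filter_congr (fun x _ => hpred x)
    _ = (pvCandidates.filter (fun x => !(ex.contains x))).filter (fun x => !(x == c)) := by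
        rw [List.filter_filter]
    _ = (pvCandidates.filter (fun x => !(ex.contains x))).tail := by
        cases hfe : pvCandidates.filter (fun x => !(ex.contains x)) with
        | nil => simp
        | cons d t =>
          rw [hfe] at hc hnd
          simp at hc
          subst hc
          rw [List.nodup_cons] at hnd
          rw [List.filter_cons_of_neg (by simp), List.tail_cons]
          exact List.filter_eq_self.mpr
            (fun x hx => by
              have hxd : x ≠ d := fun h => hnd.1 (h ▸ hx)
              simp [hxd])

-- k successful iterations collect the first k free labels
theorem pvIter (k : Nat) : ∀ (ex acc : List String), k ≤ (pvFree ex).length →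
    (fun st => pvAStep st 0)^[k] (acc, ex, 2, false) =
      (acc ++ (pvFree ex).take k, ex ++ (pvFree ex).take k, 2, false) := by
  induction k with
  | zero => intro ex acc _; simp
  | succ k ih =>
    intro ex acc hk
    cases hfe : (pvFree ex).head? with
    | none =>
      rw [List.head?_eq_none_iff] at hfe
      rw [hfe] at hk
      simp at hk
    | some c =>
      have hcons : pvFree ex = c :: (pvFree ex).tail := by
        cases h : pvFree ex with
        | nil => rw [h] at hfe; simp at hfe
        | cons a t => rw [h] at hfe; simp at hfe; simp [hfe]
      rw [Function.iterate_succ_apply, pvAStep_step ex acc c hfe,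
        ih (ex ++ [c]) (acc ++ [c]) (by rw [pvFree_append ex c hfe]; rw [hcons] at hk; simp at hk ⊢; omega),
        pvFree_append ex c hfe]
      conv_rhs => rw [hcons]
      simp [List.take_succ_cons]

-- ===== VERDICT =====
theorem generate_seating_numbers_spec : Claim_equal_generate_seating_numbers := by
  unfold Claim_equal_generate_seating_numbers
  intro n ex _ hpre
  unfold Pre_generate_seating_numbers at hpre
  unfold Spec_generate_seating_numbers
  have hcli : PySem.Str.find "ABCDEFGHIJKLMNOPQRSTUVWXYZ" "C" = 2 := by rfl
  have htn : n.toNat ≤ (pvFree ex).length := by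
    unfold pvFree
    rcases hpre with h | h <;> omega
  rw [generate_seating_numbers, generate_seating_numbers_alt]
  rw [hcli, foldl_pvAStep, PySem.List.length_pyRange_one]
  rw [show ((n - 0 : Int)).toNat = n.toNat by omega]
  rw [pvIter n.toNat ex [] htn]
  rw [pvPick_eq pvCandidates ex [] n pvCandidates_nodup]
  simp [pvFree]
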